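-- pv_equiv track=rewrite | github.com/RumbleDB/rumble | .github/scripts/generate_qt3_comment.py | process_rows
-- ===== SOURCE A (Python) =====
-- from typing import Dict, List, Tuple
--
-- def process_rows(rows: List[Dict]) -> Tuple[List[Tuple[str, int, int, int, int]], Tuple[int, int, int, int]]:
--     table_rows: List[Tuple[str, int, int, int, int]] = []
--     total_pass = total_fail = total_error = total_skip = 0
--
--     for r in rows:
--         name = str(r.get('name', 'Unknown'))
--         # Extract just the test class name (e.g., "iq.XQueryFn1Test" -> "Fn1Test" or "iq.Fn1Test" -> "Fn1Test")
--         test_name = name.split('.')[-1]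
--         # Remove "XQuery" prefix if present
--         if test_name.startswith('XQuery'):
--             test_name = test_name[6:]  # Remove "XQuery" (6 characters)
--         p = int(r.get('pass', 0))
--         f = int(r.get('fail', 0))
--         e = int(r.get('error', 0))
--         s = int(r.get('skip', 0))
--
--         table_rows.append((test_name, p, f, e, s))
--         total_pass += p
--         total_fail += f
--         total_error += e
--         total_skip += s
--
--     totals = (total_pass, total_fail, total_error, total_skip)
--     return table_rows, totals
-- ===== SOURCE B (Python) =====
-- from typing import Dict, List, Tuple
--
-- def process_rows(rows: List[Dict]) -> Tuple[List[Tuple[str, int, int, int, int]], Tuple[int, int, int, int]]: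
--     def tname(r):
--         n = str(r.get('name', 'Unknown')).split('.')[-1]
--         return n[6:] if n.startswith('XQuery') else n
--
--     def cell(r, key):
--         return int(r.get(key, 0))
--
--     table_rows = [(tname(r), cell(r, 'pass'), cell(r, 'fail'),
--                    cell(r, 'error'), cell(r, 'skip')) for r in rows]
--     totals = tuple(sum(row[i] for row in table_rows) for i in range(1, 5))
--     return table_rows, totals
-- ===== Notes on version B (the rewrite author's own statement) =====
-- stated objective: idiomatic
-- what changed: A's single loop with four running total accumulators is replaced by building the table with a comprehension over a per-row parser and then computing the totals in a separate column-wise reduction pass over the finished table.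
import Mathlib
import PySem

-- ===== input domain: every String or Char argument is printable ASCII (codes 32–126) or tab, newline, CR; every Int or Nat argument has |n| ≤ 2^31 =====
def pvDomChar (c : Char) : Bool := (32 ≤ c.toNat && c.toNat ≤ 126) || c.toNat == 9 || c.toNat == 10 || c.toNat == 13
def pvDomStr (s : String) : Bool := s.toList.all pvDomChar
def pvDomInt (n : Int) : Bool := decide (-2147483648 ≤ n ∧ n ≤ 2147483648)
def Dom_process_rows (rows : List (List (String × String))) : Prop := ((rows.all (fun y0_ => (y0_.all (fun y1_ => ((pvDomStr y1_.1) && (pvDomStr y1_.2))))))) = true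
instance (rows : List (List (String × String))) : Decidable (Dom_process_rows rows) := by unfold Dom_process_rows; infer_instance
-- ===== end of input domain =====

-- B splits A's single accumulating loop into build-the-table then column-wise total reduction; same values, same cost.

-- dict.get(k, default): first match in the association list (the type-convention reading of a dict)
def pvGet (r : List (String × String)) (k : String) : Option String :=
  (r.find? (fun p => p.1 == k)).map (fun p => p.2)

-- ===== PORT A =====
-- int(r.get(key, 0)): under Pre_ the parse never fails, so the total .getD 0 form is exact
def pvCellA (r : List (String × String)) (k : String) : Int :=
  match pvGet r k with
  | none => 0
  | some s => (PySem.Int.ofStr? s).getD 0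

def process_rows (rows : List (List (String × String))) : (List (String × Int × Int × Int × Int)) × (Int × Int × Int × Int) :=
  let st := rows.foldl (fun (acc : (List (String × Int × Int × Int × Int)) × Int × Int × Int × Int) r =>
    let name := (pvGet r "name").getD "Unknown"
    let testName0 := PySem.List.pyGetD (((PySem.Str.split? name ".").getD [])) (-1) ""
    let testName := if PySem.Str.startswith testName0 "XQuery" then PySem.Str.slice testName0 (some 6) none else testName0
    let p := pvCellA r "pass"
    let f := pvCellA r "fail"
    let e := pvCellA r "error"
    let s := pvCellA r "skip"
    (acc.1 ++ [(testName, p, f, e, s)], acc.2.1 + p, acc.2.2.1 + f, acc.2.2.2.1 + e, acc.2.2.2.2 + s))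
    ([], 0, 0, 0, 0)
  (st.1, st.2)

-- ===== PORT B =====
def pvCellB (r : List (String × String)) (k : String) : Int :=
  match pvGet r k with
  | none => 0
  | some s => (PySem.Int.ofStr? s).getD 0

def pvTName (r : List (String × String)) : String :=
  let n := PySem.List.pyGetD (((PySem.Str.split? ((pvGet r "name").getD "Unknown") ".").getD [])) (-1) ""
  if PySem.Str.startswith n "XQuery" then PySem.Str.slice n (some 6) none else n

def pvParseRow (r : List (String × String)) : String × Int × Int × Int × Int :=
  (pvTName r, pvCellB r "pass", pvCellB r "fail", pvCellB r "error", pvCellB r "skip")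

def process_rows_alt (rows : List (List (String × String))) : (List (String × Int × Int × Int × Int)) × (Int × Int × Int × Int) :=
  let table := rows.map pvParseRow
  (table,
   table.foldl (fun a row => a + row.2.1) 0,
   table.foldl (fun a row => a + row.2.2.1) 0,
   table.foldl (fun a row => a + row.2.2.2.1) 0,
   table.foldl (fun a row => a + row.2.2.2.2) 0)

-- ===== PRECONDITION & SPEC =====
-- Pre_ excludes rows where a present 'pass'/'fail'/'error'/'skip' value is not an int literal: there Python's int() raises ValueError in both A and B.
def Pre_process_rows (rows : List (List (String × String))) : Prop :=
  (rows.all (fun r => ["pass", "fail", "error", "skip"].all (fun k =>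
    match (r.find? (fun p => p.1 == k)).map (fun p => p.2) with
    | none => true
    | some s => (PySem.Int.ofStr? s).isSome))) = true
instance (rows : List (List (String × String))) : Decidable (Pre_process_rows rows) := by unfold Pre_process_rows; infer_instance

def pvWitness_process_rows : (List (List (String × String))) :=
  [[("name", "iq.XQueryFn1Test"), ("pass", "3"), ("fail", "1")], [("skip", " 7 ")]]

def Spec_process_rows (rows : List (List (String × String))) (out : (List (String × Int × Int × Int × Int)) × (Int × Int × Int × Int)) : Prop := out = process_rows_alt rows
instance (rows : List (List (String × String))) (out : (List (String × Int × Int × Int × Int)) × (Int × Int × Int × Int)) : Decidable (Spec_process_rows rows out) := by unfold Spec_process_rows; infer_instance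

-- ===== CLAIM (what is proved, stated in full; the proofs are below) =====
def Claim_equal_process_rows : Prop := ∀ (rows : List (List (String × String))), Dom_process_rows rows → Pre_process_rows rows → Spec_process_rows rows (process_rows rows)

-- ===== LEMMAS AND PROOFS =====

-- shift a summing fold's initial accumulator out front
theorem pv_foldl_add_shift {α : Type} (g : α → Int) (L : List α) (c : Int) :
    L.foldl (fun a row => a + g row) c = c + L.foldl (fun a row => a + g row) 0 := by
  induction L generalizing c with
  | nil => simp
  | cons x xs ih => simp only [List.foldl_cons]; rw [ih (c + g x), ih (0 + g x)]; ring

-- A's loop invariant: the fold extends the table by the mapped rows and adds the column sums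
theorem pv_loopA (rows : List (List (String × String)))
    (tab : List (String × Int × Int × Int × Int)) (tp tf te ts : Int) :
    rows.foldl (fun (acc : (List (String × Int × Int × Int × Int)) × Int × Int × Int × Int) r =>
      let name := (pvGet r "name").getD "Unknown"
      let testName0 := PySem.List.pyGetD (((PySem.Str.split? name ".").getD [])) (-1) ""
      let testName := if PySem.Str.startswith testName0 "XQuery" then PySem.Str.slice testName0 (some 6) none else testName0
      let p := pvCellA r "pass"
      let f := pvCellA r "fail"
      let e := pvCellA r "error"
      let s := pvCellA r "skip"
      (acc.1 ++ [(testName, p, f, e, s)], acc.2.1 + p, acc.2.2.1 + f, acc.2.2.2.1 + e, acc.2.2.2.2 + s))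
      (tab, tp, tf, te, ts)
    = (tab ++ rows.map pvParseRow,
       tp + (rows.map pvParseRow).foldl (fun a row => a + row.2.1) 0,
       tf + (rows.map pvParseRow).foldl (fun a row => a + row.2.2.1) 0,
       te + (rows.map pvParseRow).foldl (fun a row => a + row.2.2.2.1) 0,
       ts + (rows.map pvParseRow).foldl (fun a row => a + row.2.2.2.2) 0) := by
  induction rows generalizing tab tp tf te ts with
  | nil => simp
  | cons r rest ih =>
    simp only [List.foldl_cons, List.map_cons]
    rw [ih]
    rw [pv_foldl_add_shift (fun row => row.2.1) (rest.map pvParseRow) (0 + (pvParseRow r).2.1),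
        pv_foldl_add_shift (fun row => row.2.2.1) (rest.map pvParseRow) (0 + (pvParseRow r).2.2.1),
        pv_foldl_add_shift (fun row => row.2.2.2.1) (rest.map pvParseRow) (0 + (pvParseRow r).2.2.2.1),
        pv_foldl_add_shift (fun row => row.2.2.2.2) (rest.map pvParseRow) (0 + (pvParseRow r).2.2.2.2)]
    simp only [pvParseRow, pvTName, pvCellB, pvCellA, Prod.ext_iff]
    exact ⟨by simp, by simp; ring, by simp; ring, by simp; ring, by simp; ring⟩

-- ===== VERDICT (by name: the statement is the Claim_ definition above) =====
theorem process_rows_spec : Claim_equal_process_rows := by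
  intro rows _ _
  show process_rows rows = process_rows_alt rows
  unfold process_rows process_rows_alt
  rw [pv_loopA]
  simp
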